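-- pv_equiv track=rewrite | github.com/DhruvBachani/SteppenCodeChallenges | good-binary-strings/good_binary_string.py | getAllGoodstrings
-- ===== SOURCE A (Python) =====
-- def isGoodstring(binstr):
--     if(binstr.count('1') == binstr.count('0')):
--         for x in range(1, len(binstr)+1):
--             if(binstr[0:x].count('1') < binstr[0:x].count('0')):
--                 return False
--         return True
--
--     else:
--         return False
--
-- def getAllGoodstrings(binstr):
--     leftIndex = 0
--     rightIndex = len(binstr) - 1
--
--     allGoodstrings = []
--
--     while(leftIndex < len(binstr)-2):
--         if(rightIndex <= leftIndex):
--             rightIndex = len(binstr) - 1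
--             leftIndex += 1
--         if(isGoodstring(binstr[leftIndex: rightIndex+1])):
--             allGoodstrings.append(
--                 (leftIndex, rightIndex, binstr[leftIndex:rightIndex+1]))
--         rightIndex -= 1
--     return allGoodstrings
-- ===== SOURCE B (Python) =====
-- def getAllGoodstrings(binstr):
--     # Prefix-balance array: bal[j] = (#'1' - #'0') in binstr[:j].
--     # binstr[l:r+1] is "good" iff bal[r+1] == bal[l] and min(bal[l+1..r+1]) >= bal[l].
--     n = len(binstr)
--     bal = [0]
--     for c in binstr:
--         bal.append(bal[-1] + (1 if c == '1' else -1 if c == '0' else 0))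
--     res = []
--     for l in range(n - 1):
--         row = []
--         m = bal[l + 1]
--         for r in range(l + 1, n):
--             if bal[r + 1] < m:
--                 m = bal[r + 1]
--             if bal[r + 1] == bal[l] and m >= bal[l]:
--                 row.append((l, r, binstr[l:r + 1]))
--         res.extend(reversed(row))
--     return res
-- ===== Notes on version B (the rewrite author's own statement) =====
-- stated objective: faster
-- what changed: Replaces the quadruply-nested scan (for every substring, recount 0s/1s over every prefix) by a single prefix-balance array with a running minimum, giving an O(1) good-string test per substring.
-- intended difference: On strings of length exactly 2 that are themselves good (i.e. '10', or both characters outside {'0','1'}), A's loop bound 'leftIndex < len-2' exits before testing anything and A returns [], while B returns [(0, 1, binstr)]; the whole string is a good substring, so B's value is the intended one. — e.g. on getAllGoodstrings("10"): A returns [], B returns [(0, 1, "10")]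
import Mathlib
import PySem

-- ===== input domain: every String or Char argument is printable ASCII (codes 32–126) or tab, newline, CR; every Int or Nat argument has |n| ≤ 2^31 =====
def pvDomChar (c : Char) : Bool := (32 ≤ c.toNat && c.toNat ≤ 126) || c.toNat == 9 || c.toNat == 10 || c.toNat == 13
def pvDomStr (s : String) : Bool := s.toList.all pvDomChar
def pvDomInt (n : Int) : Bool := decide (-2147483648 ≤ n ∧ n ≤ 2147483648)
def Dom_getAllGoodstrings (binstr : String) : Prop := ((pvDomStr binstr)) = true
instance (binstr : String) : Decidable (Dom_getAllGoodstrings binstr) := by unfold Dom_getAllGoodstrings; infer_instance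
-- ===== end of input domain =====

-- B replaces A's quadruply nested substring/prefix recounting by a prefix-balance array with a running
-- minimum (O(n^2) instead of O(n^4)); on good strings of length exactly 2 A returns [] (loop bound quirk)
-- while B returns the whole string, stated below as D_getAllGoodstrings.

-- ===== PORT A =====
-- 'for x in range(1, len(binstr)+1): if binstr[0:x].count('1') < binstr[0:x].count('0'): return False' / 'return True'
def pvGoodLoopA (s : String) : List Int → Bool
  | [] => true
  | x :: rest =>
    if PySem.Str.count (PySem.Str.slice s (some 0) (some x)) "1" <
       PySem.Str.count (PySem.Str.slice s (some 0) (some x)) "0"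
    then false
    else pvGoodLoopA s rest

def pvIsGoodstring (s : String) : Bool :=
  if PySem.Str.count s "1" = PySem.Str.count s "0" then
    pvGoodLoopA s (PySem.List.pyRange 1 (PySem.Str.len s + 1))
  else false

-- the while loop of getAllGoodstrings, state = (leftIndex, rightIndex, allGoodstrings)
def pvALoop (s : String) (n left right : Int) (acc : List (Int × Int × String)) :
    List (Int × Int × String) :=
  if h : left < n - 2 then
    let left' := if right ≤ left then left + 1 else left
    let right' := if right ≤ left then n - 1 else right
    let acc' := if pvIsGoodstring (PySem.Str.slice s (some left') (some (right' + 1)))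
      then acc ++ [(left', right', PySem.Str.slice s (some left') (some (right' + 1)))]
      else acc
    pvALoop s n left' (right' - 1) acc'
  else acc
termination_by ((n - 2 - left).toNat, (right - left).toNat)
decreasing_by
  split_ifs with hr
  · exact Prod.Lex.left _ _ (by omega)
  · exact Prod.Lex.right _ (by omega)

def getAllGoodstrings (binstr : String) : List (Int × Int × String) :=
  pvALoop binstr (PySem.Str.len binstr) 0 (PySem.Str.len binstr - 1) []

-- ===== PORT B =====
-- list indexing helper; every index used by B's port is provably in range
def pvAt (bal : List Int) (i : Int) : Int := (PySem.List.pyGet? bal i).getD 0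

-- bal.append(bal[-1] + (1 if c == '1' else -1 if c == '0' else 0))
def pvBalList (s : String) : List Int :=
  s.toList.foldl
    (fun bal c => bal ++ [pvAt bal (-1) + (if c = '1' then (1 : Int) else if c = '0' then -1 else 0)])
    [0]

def getAllGoodstrings_alt (binstr : String) : List (Int × Int × String) :=
  let n := PySem.Str.len binstr
  let bal := pvBalList binstr
  (PySem.List.pyRange 0 (n - 1)).foldl
    (fun res l =>
      let row := ((PySem.List.pyRange (l + 1) n).foldl
        (fun (st : Int × List (Int × Int × String)) r =>
          let m := if pvAt bal (r + 1) < st.1 then pvAt bal (r + 1) else st.1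
          let row' := if pvAt bal (r + 1) = pvAt bal l ∧ pvAt bal l ≤ m
            then st.2 ++ [(l, r, PySem.Str.slice binstr (some l) (some (r + 1)))]
            else st.2
          (m, row'))
        (pvAt bal (l + 1), ([] : List (Int × Int × String)))).2
      res ++ row.reverse)
    []

-- ===== PRECONDITION & SPEC =====
-- On good strings of length exactly 2 ('10', or both characters outside {'0','1'}) A's loop bound
-- 'leftIndex < len(binstr)-2' exits before testing anything and A returns [], while B returns the
-- whole string [(0, 1, binstr)]; the whole string is a good substring, so B's value is the intended one.
def D_getAllGoodstrings (binstr : String) : Prop :=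
  binstr.toList.length = 2 ∧ (binstr = "10" ∨ ∀ c ∈ binstr.toList, c ≠ '0' ∧ c ≠ '1')
instance (binstr : String) : Decidable (D_getAllGoodstrings binstr) := by
  unfold D_getAllGoodstrings; infer_instance

def Spec_getAllGoodstrings (binstr : String) (out : List (Int × Int × String)) : Prop :=
  ¬ D_getAllGoodstrings binstr → out = getAllGoodstrings_alt binstr
instance (binstr : String) (out : List (Int × Int × String)) : Decidable (Spec_getAllGoodstrings binstr out) := by
  unfold Spec_getAllGoodstrings; infer_instance

def pvDiffWitness_getAllGoodstrings : String := "10"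
def pvDiffWitnessOut_getAllGoodstrings :
    (List (Int × Int × String)) × (List (Int × Int × String)) :=
  ([], [(0, 1, "10")])

-- ===== CLAIM (what is proved, stated in full; the proofs are below) =====
def Claim_unchanged_getAllGoodstrings : Prop :=
  ∀ (binstr : String), Dom_getAllGoodstrings binstr →
    Spec_getAllGoodstrings binstr (getAllGoodstrings binstr)
def Claim_changed_getAllGoodstrings : Prop :=
  Dom_getAllGoodstrings (pvDiffWitness_getAllGoodstrings) ∧
  D_getAllGoodstrings (pvDiffWitness_getAllGoodstrings) ∧
  getAllGoodstrings (pvDiffWitness_getAllGoodstrings) = pvDiffWitnessOut_getAllGoodstrings.1 ∧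
  getAllGoodstrings_alt (pvDiffWitness_getAllGoodstrings) = pvDiffWitnessOut_getAllGoodstrings.2 ∧
  pvDiffWitnessOut_getAllGoodstrings.1 ≠ pvDiffWitnessOut_getAllGoodstrings.2
def Claim_exact_getAllGoodstrings : Prop :=
  ∀ (binstr : String), Dom_getAllGoodstrings binstr → D_getAllGoodstrings binstr →
    getAllGoodstrings binstr ≠ getAllGoodstrings_alt binstr

-- ===== LEMMAS AND PROOFS =====

-- character balance: +1 for '1', -1 for '0', 0 otherwise
def pvD (c : Char) : Int := if c = '1' then 1 else if c = '0' then -1 else 0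
-- prefix balance of cs[:j]
def pvBal (cs : List Char) (j : Int) : Int := ((cs.take j.toNat).map pvD).sum
-- cs[l:r+1] is a good string
def pvCond (cs : List Char) (l r : Int) : Bool :=
  (pvBal cs (r + 1) == pvBal cs l) &&
  (PySem.List.pyRange (l + 1) (r + 2)).all (fun j => decide (pvBal cs l ≤ pvBal cs j))
def pvEntry (s : String) (l r : Int) : Int × Int × String :=
  (l, r, PySem.Str.slice s (some l) (some (r + 1)))
-- the good substrings with left end l and right end from r down to l+1
def pvRowD (s : String) (l r : Int) : List (Int × Int × String) :=
  ((PySem.List.pyRange (l + 1) (r + 1)).reverse.filter (fun r' => pvCond s.toList l r')).map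
    (pvEntry s l)
-- rows for left ends l, l+1, …, len-2
def pvRows (s : String) (l : Int) : List (Int × Int × String) :=
  (PySem.List.pyRange l (PySem.Str.len s - 1)).flatMap
    (fun l' => pvRowD s l' (PySem.Str.len s - 1))

theorem pvRange_nil {a b : Int} (h : b ≤ a) : PySem.List.pyRange a b = [] := by
  simp [PySem.List.pyRange, show ¬(a < b) by omega]

theorem pvCount_go_step (c d : Char) (t : List Char) (f acc : Nat) :
    PySem.Chars.count.go [c] (f+1) (d :: t) acc =
    (if c = d then PySem.Chars.count.go [c] f t (acc+1) else PySem.Chars.count.go [c] f t acc) := by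
  simp only [PySem.Chars.count.go]
  by_cases hd : c = d <;> simp [List.isPrefixOf, hd]

theorem pvCount_go (c : Char) (cs : List Char) : ∀ (fuel acc : Nat), cs.length ≤ fuel →
    PySem.Chars.count.go [c] fuel cs acc = acc + cs.count c := by
  induction cs with
  | nil => intro fuel acc h; cases fuel <;> simp [PySem.Chars.count.go]
  | cons d t ih =>
    intro fuel acc h
    cases fuel with
    | zero => simp at h
    | succ f =>
      rw [pvCount_go_step]
      by_cases hd : c = d
      · rw [if_pos hd, ih f (acc+1) (by simpa using h)]
        simp [hd.symm]; omega
      · rw [if_neg hd, ih f acc (by simpa using h)]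
        have : (d == c) = false := by simp; exact fun hh => hd hh.symm
        simp [List.count_cons, this]

theorem pvCount_single (cs : List Char) (c : Char) :
    PySem.Chars.count cs [c] = cs.count c := by
  simp [PySem.Chars.count, pvCount_go c cs cs.length 0 le_rfl]

theorem pvSumD (t : List Char) :
    ((t.map pvD).sum : Int) = (t.count '1' : Int) - (t.count '0' : Int) := by
  induction t with
  | nil => simp
  | cons c t ih =>
    simp only [List.map_cons, List.sum_cons, List.count_cons, ih, pvD]
    by_cases h1 : c = '1'
    · simp [h1]; omega
    · by_cases h0 : c = '0'
      · simp [h0]; omega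
      · have e1 : (c == '1') = false := by simp [h1]
        have e0 : (c == '0') = false := by simp [h0]
        simp [h1, h0, e1, e0]

theorem pvSeg (cs : List Char) (l x : Nat) :
    ((((cs.drop l).take x).map pvD).sum : Int) = pvBal cs ((l : Int) + (x : Int)) - pvBal cs (l : Int) := by
  have h : cs.take (l + x) = cs.take l ++ (cs.drop l).take x := List.take_add ..
  have : pvBal cs ((l : Int) + (x : Int)) = pvBal cs (l : Int) + (((cs.drop l).take x).map pvD).sum := by
    simp only [pvBal]
    rw [show ((l : Int) + (x : Int)).toNat = l + x by omega, show ((l:Int)).toNat = l by omega, h]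
    simp
  omega

theorem pvGoodLoopA_all (s : String) (xs : List Int) :
    pvGoodLoopA s xs = xs.all (fun x =>
      !(PySem.Str.count (PySem.Str.slice s (some 0) (some x)) "1" <
        PySem.Str.count (PySem.Str.slice s (some 0) (some x)) "0")) := by
  induction xs with
  | nil => rfl
  | cons x rest ih =>
    rw [pvGoodLoopA, List.all_cons, ih]
    split_ifs with h
    · rw [decide_eq_true h]; simp only [Bool.not_true, Bool.false_and]
    · rw [decide_eq_false h]; simp only [Bool.not_false, Bool.true_and]

-- A's good-string test on the slice equals the balance condition
theorem pvIsGood_eq_cond (s : String) (l r : Int) (h0 : 0 ≤ l) (hlr : l < r)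
    (hr : r ≤ (s.toList.length : Int) - 1) :
    pvIsGoodstring (PySem.Str.slice s (some l) (some (r + 1))) = pvCond s.toList l r := by
  have h0' : (0:Int) ≤ r + 1 := by omega
  set cs := s.toList with hcs
  set L : Nat := (r+1).toNat - l.toNat with hL
  set t := (cs.drop l.toNat).take L with ht
  set T := PySem.Str.slice s (some l) (some (r + 1)) with hT
  have htl : T.toList = t := by
    rw [hT, PySem.Str.toList_slice]
    simp only [PySem.Chars.slice_eq_listSlice]
    rw [PySem.List.slice_toNat cs h0 h0']
  have hcsl : l.toNat ≤ cs.length := by omega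
  have hLen : t.length = L := by
    rw [ht, List.length_take, List.length_drop]; omega
  have hsum : ((t.map pvD).sum : Int) = pvBal cs (r + 1) - pvBal cs l := by
    rw [ht, pvSeg cs l.toNat L, show ((l.toNat:Int) + (L:Int)) = r + 1 by omega,
      show ((l.toNat:Int)) = l by omega]
  have hc1 : PySem.Str.count T "1" = t.count '1' := by
    rw [PySem.Str.count_eq, htl, show ("1").toList = ['1'] from rfl, pvCount_single]
  have hc0 : PySem.Str.count T "0" = t.count '0' := by
    rw [PySem.Str.count_eq, htl, show ("0").toList = ['0'] from rfl, pvCount_single]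
  have hsum2 := pvSumD t
  rw [pvIsGoodstring, pvGoodLoopA_all, hc1, hc0]
  by_cases hc : t.count '1' = t.count '0'
  · have hbal : pvBal cs (r + 1) = pvBal cs l := by omega
    rw [if_pos hc, pvCond, show (pvBal cs (r + 1) == pvBal cs l) = true from beq_iff_eq.mpr hbal,
      Bool.true_and]
    -- per-element equivalence
    have helem : ∀ x : Int, 1 ≤ x → x ≤ (L : Int) →
        ((PySem.Str.count (PySem.Str.slice T (some 0) (some x)) "0" ≤
          PySem.Str.count (PySem.Str.slice T (some 0) (some x)) "1") ↔
          pvBal cs l ≤ pvBal cs (l + x)) := by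
      intro x hx1 hx2
      have hx0 : (0:Int) ≤ x := by omega
      have hslice : (PySem.Str.slice T (some 0) (some x)).toList =
          (cs.drop l.toNat).take x.toNat := by
        rw [PySem.Str.toList_slice]
        simp only [PySem.Chars.slice_eq_listSlice, PySem.List.slice_zero_start]
        rw [PySem.List.slice_to T.toList hx0, htl, ht, List.take_take,
          show min x.toNat L = x.toNat by omega]
      have hcx1 : PySem.Str.count (PySem.Str.slice T (some 0) (some x)) "1" =
          ((cs.drop l.toNat).take x.toNat).count '1' := by
        rw [PySem.Str.count_eq, hslice, show ("1").toList = ['1'] from rfl, pvCount_single]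
      have hcx0 : PySem.Str.count (PySem.Str.slice T (some 0) (some x)) "0" =
          ((cs.drop l.toNat).take x.toNat).count '0' := by
        rw [PySem.Str.count_eq, hslice, show ("0").toList = ['0'] from rfl, pvCount_single]
      have hsx : ((((cs.drop l.toNat).take x.toNat).map pvD).sum : Int) =
          pvBal cs (l + x) - pvBal cs l := by
        rw [pvSeg cs l.toNat x.toNat, show ((l.toNat:Int) + (x.toNat:Int)) = l + x by omega,
          show ((l.toNat:Int)) = l by omega]
      have hsx2 := pvSumD ((cs.drop l.toNat).take x.toNat)
      rw [hcx1, hcx0]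
      omega
    have hlen' : PySem.Str.len T = (L : Int) := by
      rw [PySem.Str.len_eq, htl, hLen]
    rw [hlen']
    rw [Bool.eq_iff_iff]
    simp only [List.all_eq_true, PySem.List.mem_pyRange_one, Bool.not_eq_true',
      decide_eq_false_iff_not, not_lt, decide_eq_true_eq]
    constructor
    · intro h j hj
      have hx := h (j - l) ⟨by omega, by omega⟩
      have := (helem (j - l) (by omega) (by omega)).mp hx
      rwa [show l + (j - l) = j by omega] at this
    · intro h x hx
      exact (helem x (by omega) (by omega)).mpr (h (l + x) ⟨by omega, by omega⟩)
  · have hbal : pvBal cs (r + 1) ≠ pvBal cs l := by omega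
    rw [if_neg hc, pvCond, show (pvBal cs (r + 1) == pvBal cs l) = false from
      beq_eq_false_iff_ne.mpr hbal, Bool.false_and]

theorem pvRowD_nil (s : String) (l r : Int) (h : r ≤ l) : pvRowD s l r = [] := by
  rw [pvRowD, pvRange_nil (by omega)]; rfl

theorem pvRowD_split (s : String) (l r : Int) (h : l + 1 ≤ r) :
    pvRowD s l r =
      (if pvCond s.toList l r then [pvEntry s l r] else []) ++ pvRowD s l (r - 1) := by
  rw [pvRowD, show r + 1 = (r - 1 + 1) + 1 by ring, PySem.List.pyRange_one_succ_right (by omega),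
    List.reverse_append]
  rw [show r - 1 + 1 = r by ring]
  rw [List.reverse_singleton, List.singleton_append, List.filter_cons]
  by_cases hc : pvCond s.toList l r
  · rw [if_pos (by simpa using hc), List.map_cons, if_pos hc, pvRowD, List.singleton_append,
      show r - 1 + 1 = r by ring]
  · rw [if_neg (by simpa using hc), if_neg hc, pvRowD, List.nil_append,
      show r - 1 + 1 = r by ring]

-- the while-loop invariant
theorem pvALoop_spec (s : String) (n left right : Int) (acc : List (Int × Int × String))
    (hn : n = (s.toList.length : Int)) (h0 : 0 ≤ left) (hlr : left ≤ right)
    (hr : right ≤ n - 1) :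
    pvALoop s n left right acc =
      if left < n - 2 then
        acc ++ pvRowD s left right ++
          (PySem.List.pyRange (left + 1) (n - 1)).flatMap (fun l' => pvRowD s l' (n - 1))
      else acc := by
  induction left, right, acc using pvALoop.induct s n with
  | case1 left right acc hguard lft rgt ac ih =>
    have hlft : lft = (if _h : right ≤ left then left + 1 else left) := rfl
    have hrgt : rgt = (if _h : right ≤ left then n - 1 else right) := rfl
    have hac : ac = (if _h : pvIsGoodstring (PySem.Str.slice s (some lft) (some (rgt + 1))) = true
        then acc ++ [(lft, rgt, PySem.Str.slice s (some lft) (some (rgt + 1)))] else acc) := rfl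
    rw [hac, hlft, hrgt] at ih
    rw [pvALoop, dif_pos hguard]
    by_cases hres : right ≤ left
    · -- reset: right = left, move to row left+1 starting at the top
      have hre : right = left := by omega
      simp only [dif_pos hres, dite_eq_ite] at ih
      simp only [if_pos hres]
      rw [pvIsGood_eq_cond s (left + 1) (n - 1) (by omega) (by omega) (by omega)] at ih ⊢
      specialize ih (by omega) (by omega) (by omega)
      rw [ih, if_pos hguard, pvRowD_nil s left right (by omega)]
      by_cases hnext : left + 1 < n - 2
      · rw [if_pos hnext]
        rw [PySem.List.pyRange_one_cons (show left + 1 < n - 1 by omega), List.flatMap_cons]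
        rw [pvRowD_split s (left + 1) (n - 1) (by omega), show n - 1 - 1 = n - 2 by ring]
        split_ifs with hc <;> simp [pvEntry, show n - 1 + 1 = n by ring]
      · rw [if_neg hnext]
        have hl2 : left + 1 = n - 2 := by omega
        rw [PySem.List.pyRange_one_cons (show left + 1 < n - 1 by omega),
          pvRange_nil (show n - 1 ≤ left + 1 + 1 by omega), List.flatMap_cons, List.flatMap_nil]
        rw [pvRowD_split s (left + 1) (n - 1) (by omega), show n - 1 - 1 = n - 2 by ring,
          pvRowD_nil s (left + 1) (n - 2) (by omega)]
        split_ifs with hc <;> simp [pvEntry, show n - 1 + 1 = n by ring]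
    · -- step right down by one inside row left
      simp only [dif_neg hres, dite_eq_ite] at ih
      simp only [if_neg hres]
      rw [pvIsGood_eq_cond s left right (by omega) (by omega) (by omega)] at ih ⊢
      specialize ih (by omega) (by omega) (by omega)
      rw [ih, if_pos hguard, if_pos hguard]
      rw [pvRowD_split s left right (by omega)]
      split_ifs with hc <;> simp [pvEntry]
  | case2 left right acc hguard =>
    rw [pvALoop, dif_neg hguard, if_neg hguard]

theorem pvA_spec (s : String) :
    getAllGoodstrings s =
      if 0 < (s.toList.length : Int) - 2 then pvRows s 0 else [] := by
  rw [getAllGoodstrings]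
  have hn : PySem.Str.len s = (s.toList.length : Int) := PySem.Str.len_eq s
  by_cases h3 : 0 < (s.toList.length : Int) - 2
  · rw [pvALoop_spec s (PySem.Str.len s) 0 (PySem.Str.len s - 1) [] hn le_rfl (by omega) le_rfl,
      if_pos (by omega), if_pos h3, pvRows,
      PySem.List.pyRange_one_cons (show (0:Int) < PySem.Str.len s - 1 by omega),
      List.flatMap_cons]
    simp
  · rw [pvALoop, dif_neg (by omega), if_neg h3]

theorem pvAt_last (pre : List Int) (b : Int) : pvAt (pre ++ [b]) (-1) = b := by
  simp [pvAt, PySem.List.pyGet?, PySem.List.pyIdx?]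

theorem pvBalFold (cs : List Char) : ∀ (pre : List Int) (b : Int),
    cs.foldl (fun bal c => bal ++ [pvAt bal (-1) + (if c = '1' then (1 : Int) else if c = '0' then -1 else 0)]) (pre ++ [b]) =
    pre ++ [b] ++ (List.range cs.length).map (fun j => b + ((cs.take (j+1)).map pvD).sum) := by
  induction cs with
  | nil => intro pre b; simp
  | cons c t ih =>
    intro pre b
    simp only [List.foldl_cons, pvAt_last]
    rw [show (pre ++ [b]) ++ [b + (if c = '1' then (1 : Int) else if c = '0' then -1 else 0)] =
        (pre ++ [b]) ++ [b + pvD c] by simp [pvD]]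
    rw [ih (pre ++ [b]) (b + pvD c)]
    simp only [List.length_cons, List.range_succ_eq_map, List.map_cons, List.map_map]
    simp only [List.take_succ_cons, List.map_cons, List.sum_cons]
    simp [Function.comp_def, add_assoc]

-- minimum of pvBal over indices l+1 .. r+1
def pvMinB (cs : List Char) (l r : Int) : Int :=
  ((PySem.List.pyRange (l + 2) (r + 2)).map (pvBal cs)).foldl min (pvBal cs (l + 1))

theorem pvMinB_base (cs : List Char) (l : Int) : pvMinB cs l l = pvBal cs (l + 1) := by
  rw [pvMinB, pvRange_nil (by omega)]; rfl

theorem pvMinB_step (cs : List Char) (l r : Int) (h : l + 1 ≤ r) :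
    pvMinB cs l r = min (pvMinB cs l (r - 1)) (pvBal cs (r + 1)) := by
  rw [pvMinB, show r + 2 = (r + 1) + 1 by ring, PySem.List.pyRange_one_succ_right (by omega),
    List.map_append, List.foldl_append, pvMinB, show r - 1 + 2 = r + 1 by ring]
  simp

theorem pvMinB_le_iff (cs : List Char) (l r c : Int) (h : l ≤ r) :
    c ≤ pvMinB cs l r ↔ (∀ j : Int, l + 1 ≤ j → j ≤ r + 1 → c ≤ pvBal cs j) := by
  constructor
  · intro hm j hj1 hj2
    rcases eq_or_lt_of_le hj1 with he | hlt
    · exact le_trans (le_trans hm (PySem.List.foldl_min_le _ _).1) (by rw [← he])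
    · refine le_trans hm ((PySem.List.foldl_min_le _ _).2 (pvBal cs j) ?_)
      exact List.mem_map_of_mem (by rw [PySem.List.mem_pyRange_one]; omega)
  · intro hall
    rcases PySem.List.foldl_min_mem ((PySem.List.pyRange (l + 2) (r + 2)).map (pvBal cs))
        (pvBal cs (l + 1)) with he | hm
    · rw [pvMinB, he]; exact hall (l + 1) (by omega) (by omega)
    · rw [pvMinB]
      obtain ⟨j, hj, hje⟩ := List.mem_map.mp hm
      rw [PySem.List.mem_pyRange_one] at hj
      rw [← hje]; exact hall j (by omega) (by omega)

theorem pvCond_iff (cs : List Char) (l r : Int) (h : l ≤ r) :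
    pvCond cs l r = true ↔
      (pvBal cs (r + 1) = pvBal cs l ∧ pvBal cs l ≤ pvMinB cs l r) := by
  rw [pvCond, Bool.and_eq_true, beq_iff_eq, List.all_eq_true, pvMinB_le_iff cs l r _ h]
  constructor
  · rintro ⟨h1, h2⟩
    refine ⟨h1, fun j hj1 hj2 => ?_⟩
    simpa using h2 j (by rw [PySem.List.mem_pyRange_one]; omega)
  · rintro ⟨h1, h2⟩
    refine ⟨h1, fun j hj => ?_⟩
    rw [PySem.List.mem_pyRange_one] at hj
    simpa using h2 j (by omega) (by omega)

theorem pvBalList_eq (s : String) :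
    pvBalList s = (List.range (s.toList.length + 1)).map (fun j => ((s.toList.take j).map pvD).sum) := by
  rw [pvBalList, show ([0] : List Int) = [] ++ [0] from rfl, pvBalFold]
  simp [List.range_succ_eq_map, Function.comp_def, List.map_take]

theorem pvAt_balList (s : String) (j : Int) (h0 : 0 ≤ j)
    (hj : j ≤ (s.toList.length : Int)) :
    pvAt (pvBalList s) j = pvBal s.toList j := by
  rw [pvBalList_eq]
  have hlt : j.toNat < s.toList.length + 1 := by omega
  simp only [pvAt, PySem.List.pyGet?, PySem.List.pyIdx?, List.length_map, List.length_range,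
    if_pos h0, show j < ((s.toList.length + 1 : Nat) : Int) by push_cast; omega, if_pos]
  have hL : s.toList.length = s.length := String.length_toList
  have hlt2 : j.toNat < s.length + 1 := by omega
  simp [List.getElem?_map, hlt2, pvBal]

theorem pvInner (s : String) (l n : Int) :
    ∀ (k : Nat) (a : Int), k = (n - a).toNat → l + 1 ≤ a →
    ∀ (row0 : List (Int × Int × String)),
    ((PySem.List.pyRange a n).foldl
      (fun (st : Int × List (Int × Int × String)) r =>
        (if pvBal s.toList (r + 1) < st.1 then pvBal s.toList (r + 1) else st.1,
         if pvBal s.toList (r + 1) = pvBal s.toList l ∧ pvBal s.toList l ≤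
             (if pvBal s.toList (r + 1) < st.1 then pvBal s.toList (r + 1) else st.1)
           then st.2 ++ [(l, r, PySem.Str.slice s (some l) (some (r + 1)))] else st.2))
      (pvMinB s.toList l (a - 1), row0)).2
    = row0 ++ ((PySem.List.pyRange a n).filter (fun r => pvCond s.toList l r)).map (pvEntry s l) := by
  intro k
  induction k with
  | zero =>
    intro a hk ha row0
    rw [pvRange_nil (by omega)]
    simp
  | succ k ih =>
    intro a hk ha row0
    by_cases han : a < n
    · rw [PySem.List.pyRange_one_cons han, List.foldl_cons]
      have hm' : (if pvBal s.toList (a + 1) < pvMinB s.toList l (a - 1)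
          then pvBal s.toList (a + 1) else pvMinB s.toList l (a - 1)) = pvMinB s.toList l a := by
        rw [pvMinB_step s.toList l a ha, min_def]
        split_ifs <;> omega
      rw [hm']
      have hrow : (if pvBal s.toList (a + 1) = pvBal s.toList l ∧
            pvBal s.toList l ≤ pvMinB s.toList l a
          then row0 ++ [(l, a, PySem.Str.slice s (some l) (some (a + 1)))] else row0) =
          row0 ++ (if pvCond s.toList l a then [pvEntry s l a] else []) := by
        by_cases hc : pvCond s.toList l a = true
        · rw [if_pos ((pvCond_iff s.toList l a (by omega)).mp hc), if_pos hc, pvEntry]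
        · rw [if_neg (fun hh => hc ((pvCond_iff s.toList l a (by omega)).mpr hh)),
            if_neg (by simpa using hc)]
          simp
      rw [hrow, show pvMinB s.toList l a = pvMinB s.toList l ((a + 1) - 1) by norm_num]
      rw [ih (a + 1) (by omega) (by omega)]
      rw [List.filter_cons]
      by_cases hc : pvCond s.toList l a = true
      · rw [if_pos (by simpa using hc), if_pos hc, List.map_cons]
        simp
      · rw [if_neg (by simpa using hc), if_neg (by simpa using hc)]
        simp
    · rw [pvRange_nil (by omega)]
      simp

theorem pvB_spec (s : String) : getAllGoodstrings_alt s = pvRows s 0 := by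
  have hn : PySem.Str.len s = (s.toList.length : Int) := PySem.Str.len_eq s
  simp only [getAllGoodstrings_alt]
  rw [PySem.List.foldl_congr_mem (PySem.List.pyRange 0 (PySem.Str.len s - 1)) _
    (fun res l => res ++ pvRowD s l (PySem.Str.len s - 1)) [] ?_]
  · rw [PySem.List.foldl_append_eq_flatMap, pvRows, List.nil_append]
  · intro res l hl
    rw [PySem.List.mem_pyRange_one] at hl
    congr 1
    -- the inner loop, with list lookups replaced by pvBal
    rw [PySem.List.foldl_congr_mem (PySem.List.pyRange (l + 1) (PySem.Str.len s))
      (fun (st : Int × List (Int × Int × String)) r =>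
        (if pvAt (pvBalList s) (r + 1) < st.1 then pvAt (pvBalList s) (r + 1) else st.1,
         if pvAt (pvBalList s) (r + 1) = pvAt (pvBalList s) l ∧ pvAt (pvBalList s) l ≤
             (if pvAt (pvBalList s) (r + 1) < st.1 then pvAt (pvBalList s) (r + 1) else st.1)
           then st.2 ++ [(l, r, PySem.Str.slice s (some l) (some (r + 1)))] else st.2))
      (fun (st : Int × List (Int × Int × String)) r =>
        (if pvBal s.toList (r + 1) < st.1 then pvBal s.toList (r + 1) else st.1,
         if pvBal s.toList (r + 1) = pvBal s.toList l ∧ pvBal s.toList l ≤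
             (if pvBal s.toList (r + 1) < st.1 then pvBal s.toList (r + 1) else st.1)
           then st.2 ++ [(l, r, PySem.Str.slice s (some l) (some (r + 1)))] else st.2))
      (pvAt (pvBalList s) (l + 1), ([] : List (Int × Int × String)))
      (fun st r hr => by
        simp only []
        rw [PySem.List.mem_pyRange_one] at hr
        rw [pvAt_balList s (r + 1) (by omega) (by omega), pvAt_balList s l (by omega) (by omega)])]
    rw [pvAt_balList s (l + 1) (by omega) (by omega),
      show pvBal s.toList (l + 1) = pvMinB s.toList l ((l + 1) - 1) by
        rw [show l + 1 - 1 = l by ring, pvMinB_base]]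
    rw [pvInner s l (PySem.Str.len s) (PySem.Str.len s - (l + 1)).toNat (l + 1) rfl le_rfl]
    rw [List.nil_append, pvRowD, show PySem.Str.len s - 1 + 1 = PySem.Str.len s by ring]
    simp [List.filter_reverse, List.map_reverse]

-- a good whole string of length 2 is exactly D_
theorem pvCond2 (s : String) (a b : Char) (h : s.toList = [a, b]) :
    pvCond s.toList 0 1 = true ↔ (s = "10" ∨ ∀ c ∈ s.toList, c ≠ '0' ∧ c ≠ '1') := by
  have key : ∀ c : Char, (c = '1' ∧ pvD c = 1) ∨ (c = '0' ∧ pvD c = -1) ∨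
      (c ≠ '1' ∧ c ≠ '0' ∧ pvD c = 0) := by
    intro c
    by_cases c1 : c = '1'
    · exact Or.inl ⟨c1, by simp [pvD, c1]⟩
    · by_cases c0 : c = '0'
      · exact Or.inr (Or.inl ⟨c0, by simp [pvD, c0]⟩)
      · exact Or.inr (Or.inr ⟨c1, c0, by simp [pvD, c1, c0]⟩)
  have hs : s = "10" ↔ (a = '1' ∧ b = '0') := by
    constructor
    · intro hh
      rw [hh, show ("10").toList = ['1', '0'] by decide] at h
      obtain ⟨h1', h2'⟩ := List.cons.injEq .. ▸ h
      exact ⟨h1'.symm, by simpa using congrArg (fun l => l.headI) h2'.symm⟩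
    · rintro ⟨ha, hb⟩
      exact String.toList_inj.mp (by rw [h, ha, hb]; decide)
  rw [h, hs]
  have h2 : pvBal [a, b] 2 = pvD a + pvD b := by simp [pvBal]
  have h1 : pvBal [a, b] 1 = pvD a := by simp [pvBal]
  have h0 : pvBal [a, b] 0 = 0 := by simp [pvBal]
  rw [pvCond, show PySem.List.pyRange (0 + 1) (1 + 2) = [1, 2] by decide]
  simp only [List.all_cons, List.all_nil, show (1:Int) + 1 = 2 by norm_num, h0, h1, h2,
    Bool.and_true, Bool.and_eq_true, beq_iff_eq, decide_eq_true_eq]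
  constructor
  · rintro ⟨hsum, hpa, hpab⟩
    rcases key a with ⟨a1, va⟩ | ⟨a0, va⟩ | ⟨a1, a0, va⟩ <;>
      rcases key b with ⟨b1, vb⟩ | ⟨b0, vb⟩ | ⟨b1, b0, vb⟩
    · exact absurd hsum (by omega)
    · exact Or.inl ⟨a1, b0⟩
    · exact absurd hsum (by omega)
    · exact absurd hpa (by omega)
    · exact absurd hpa (by omega)
    · exact absurd hpa (by omega)
    · exact absurd hsum (by omega)
    · exact absurd hsum (by omega)
    · refine Or.inr fun c hc => ?_
      rcases List.mem_pair.mp hc with rfl | rfl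
      · exact ⟨a0, a1⟩
      · exact ⟨b0, b1⟩
  · rintro (⟨ha, hb⟩ | hall)
    · have va : pvD a = 1 := by simp [pvD, ha]
      have vb : pvD b = -1 := by simp [pvD, hb]
      refine ⟨by omega, by omega, by omega⟩
    · obtain ⟨a0, a1⟩ := hall a (by simp)
      obtain ⟨b0, b1⟩ := hall b (by simp)
      have va : pvD a = 0 := by simp [pvD, a0, a1]
      have vb : pvD b = 0 := by simp [pvD, b0, b1]
      refine ⟨by omega, by omega, by omega⟩

-- ===== VERDICT (by name: the statement is the Claim_ definition above) =====
theorem getAllGoodstrings_spec : Claim_unchanged_getAllGoodstrings := by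
  intro binstr hdom hnD
  rw [pvA_spec, pvB_spec]
  by_cases h3 : 0 < (binstr.toList.length : Int) - 2
  · rw [if_pos h3]
  · rw [if_neg h3]
    by_cases h2 : binstr.toList.length = 2
    · obtain ⟨a, b, hab⟩ := List.length_eq_two.mp h2
      have hlen : (binstr.toList.length : Int) = 2 := by exact_mod_cast h2
      have hcf : pvCond binstr.toList 0 1 = false := by
        rcases Bool.eq_false_or_eq_true (pvCond binstr.toList 0 1) with ht | hf
        · exact absurd ⟨h2, (pvCond2 binstr a b hab).mp ht⟩ hnD
        · exact hf
      rw [pvRows, PySem.Str.len_eq, hlen, show (2:Int) - 1 = 1 by norm_num,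
        show PySem.List.pyRange 0 1 = [0] by decide, List.flatMap_cons, List.flatMap_nil,
        pvRowD, show (0:Int) + 1 = 1 by norm_num, show (1:Int) + 1 = 2 by norm_num,
        show PySem.List.pyRange 1 2 = [1] by decide]
      simp [hcf]
    · rw [pvRows, PySem.Str.len_eq, pvRange_nil (by omega)]
      rfl

theorem getAllGoodstrings_changed : Claim_changed_getAllGoodstrings := by
  unfold Claim_changed_getAllGoodstrings
  refine ⟨by decide, by decide, ?_, by decide, by decide⟩
  show getAllGoodstrings "10" = _
  rw [pvA_spec, if_neg (by decide)]
  rfl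

theorem getAllGoodstrings_tight : Claim_exact_getAllGoodstrings := by
  intro binstr hdom hD
  obtain ⟨h2, hgood⟩ := hD
  obtain ⟨a, b, hab⟩ := List.length_eq_two.mp h2
  have hlen : (binstr.toList.length : Int) = 2 := by exact_mod_cast h2
  rw [pvA_spec, pvB_spec, if_neg (by omega)]
  have hc : pvCond binstr.toList 0 1 = true := (pvCond2 binstr a b hab).mpr hgood
  rw [pvRows, PySem.Str.len_eq, hlen, show (2:Int) - 1 = 1 by norm_num,
    show PySem.List.pyRange 0 1 = [0] by decide, List.flatMap_cons, List.flatMap_nil,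
    pvRowD, show (0:Int) + 1 = 1 by norm_num, show (1:Int) + 1 = 2 by norm_num,
    show PySem.List.pyRange 1 2 = [1] by decide]
  simp [hc]
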